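-- pv_equiv track=rewrite | github.com/pypi-data/pypi-mirror-342 | packages/apiconfig/apiconfig-0.3.0.dev14-py3-none-any.whl/apiconfig/utils/url/building.py | _parse_path_components
-- ===== SOURCE A (Python) =====
-- from typing import List, Mapping, Sequence, Tuple, Union
--
-- def _parse_path_components(path: str) -> Tuple[str, List[str], List[str], str]:
--     """Parse a URL path into components while preserving slash patterns.
--
--     Returns
--     -------
--     Tuple[str, List[str], List[str], str]
--         Tuple containing:
--         - leading_slashes: The pattern of slashes at the beginning of the path
--         - segments: List of path segments
--         - slash_patterns: List of slash patterns between segments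
--         - trailing_slashes: The pattern of slashes at the end of the path
--     """
--     segments = []
--     current_segment = ""
--     i = 0
--
--     # Track leading slashes pattern
--     leading_slashes = ""
--     if path.startswith("/"):
--         # Count and preserve all leading slashes
--         while i < len(path) and path[i] == "/":
--             leading_slashes += "/"
--             i += 1
--
--     # Process the path character by character to preserve double slashes
--     slash_patterns = []  # Track exact slash patterns between segments
--
--     while i < len(path):
--         if path[i] == "/":
--             # Add the current segment
--             segments.append(current_segment)
--             current_segment = ""
--
--             # Start collecting slashes
--             slash_pattern = "/"
--             i += 1
--
--             # Collect all consecutive slashes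
--             while i < len(path) and path[i] == "/":
--                 slash_pattern += "/"
--                 i += 1
--
--             # Store the slash pattern
--             slash_patterns.append(slash_pattern)
--         else:
--             current_segment += path[i]
--             i += 1
--
--     # Add the last segment
--     if i > 0 or current_segment:  # Only add if we have a segment or processed something
--         segments.append(current_segment)
--
--     # Handle trailing slashes
--     trailing_slashes = ""
--     if path.endswith("/"):
--         # Special case for root path "/"
--         if path == "/":
--             segments = [""]
--             trailing_slashes = "/"
--             leading_slashes = "/"  # Ensure leading slash is set for root path
--             return leading_slashes, segments, slash_patterns, trailing_slashes
--
--         # For paths ending with slash, we need to handle trailing slashes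
--         trailing_slashes = "/"  # Default for all paths ending with slash
--
--         # If the last segment is empty due to trailing slashes
--         if segments and not segments[-1] and slash_patterns:
--             # Store the slash pattern but don't remove it from the list
--             # This fixes the issue with missing slash patterns
--             trailing_slashes = slash_patterns[-1]  # Preserve the trailing slash pattern
--         # Don't remove the empty segment as it's needed for proper path reconstruction
--
--     # Ensure we always return a valid result
--     return leading_slashes, segments, slash_patterns, trailing_slashes
-- ===== SOURCE B (Python) =====
-- def _parse_path_components(path):
--     # Tokenize once into maximal runs of slash / non-slash characters, then slice.
--     runs = []
--     for ch in path:
--         if runs and (runs[-1][0] == "/") == (ch == "/"):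
--             runs[-1].append(ch)
--         else:
--             runs.append([ch])
--     runs = ["".join(r) for r in runs]
--     leading_slashes = ""
--     if runs and runs[0][0] == "/":
--         leading_slashes = runs.pop(0)
--     segments = runs[0::2]
--     slash_patterns = runs[1::2]
--     trailing_slashes = ""
--     if path.endswith("/"):
--         segments.append("")
--         trailing_slashes = slash_patterns[-1] if slash_patterns else "/"
--     return leading_slashes, segments, slash_patterns, trailing_slashes
-- ===== Notes on version B (the rewrite author's own statement) =====
-- stated objective: faster
-- what changed: Replaces A's char-by-char state machine (quadratic repeated string concatenation for the current segment and slash patterns, nested slash-collecting loops, post-hoc special cases for the root path and trailing segment) by a tokenize-then-slice decomposition: one linear pass groups the path into maximal runs of slash and non-slash characters (appending chars to lists, joined once), then leading/segments/patterns/trailing fall out of list slicing with no special cases.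
import Mathlib
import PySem

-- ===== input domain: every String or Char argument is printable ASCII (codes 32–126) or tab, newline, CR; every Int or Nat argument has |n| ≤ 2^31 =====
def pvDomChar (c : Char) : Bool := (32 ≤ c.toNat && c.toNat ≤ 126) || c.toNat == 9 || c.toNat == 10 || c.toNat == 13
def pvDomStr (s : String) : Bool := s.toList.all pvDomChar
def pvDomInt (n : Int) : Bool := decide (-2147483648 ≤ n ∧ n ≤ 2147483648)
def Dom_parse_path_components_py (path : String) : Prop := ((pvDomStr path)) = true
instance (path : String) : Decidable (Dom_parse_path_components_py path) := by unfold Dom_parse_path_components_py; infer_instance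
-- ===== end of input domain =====

-- B replaces A's char-by-char state machine (nested slash loops, repeated string
-- concatenation, post-hoc special cases) by a tokenize-into-runs-then-slice decomposition;
-- objective: faster (one linear grouping pass, then slicing). Strings are handled as their
-- character lists (exact for Python str on this domain).

-- ===== PORT A =====

-- A's inner while loop collecting consecutive slashes (also A's leading-slash loop):
-- returns (accumulated pattern, remaining characters).
def pvA_slashes : List Char → List Char → (List Char × List Char)
  | [], pat => (pat, [])
  | c :: cs, pat => if c == '/' then pvA_slashes cs (pat ++ ['/']) else (pat, c :: cs)

theorem pvA_slashes_len : ∀ (cs pat : List Char), (pvA_slashes cs pat).2.length ≤ cs.length := by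
  intro cs
  induction cs with
  | nil => intro pat; simp [pvA_slashes]
  | cons c cs ih =>
    intro pat
    simp only [pvA_slashes]
    split
    · exact Nat.le_trans (ih _) (Nat.le_succ _)
    · simp

-- A's main while loop: state (segments, current_segment, slash_patterns).
def pvA_main : List Char → List (List Char) → List Char → List (List Char) →
    (List (List Char) × List Char × List (List Char))
  | [], segs, cur, pats => (segs, cur, pats)
  | c :: cs, segs, cur, pats =>
    if c == '/' then
      let r := pvA_slashes cs ['/']
      pvA_main r.2 (segs ++ [cur]) [] (pats ++ [r.1])
    else
      pvA_main cs segs (cur ++ [c]) pats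
termination_by cs => cs.length
decreasing_by
  · exact Nat.lt_succ_of_le (pvA_slashes_len cs ['/'])
  · simp

def parse_path_components_py (path : String) : String × List String × List String × String :=
  let cs := path.toList
  -- leading slashes (A's first while loop; a no-op unless path starts with '/')
  let lead := if cs.head? == some '/' then pvA_slashes cs [] else ([], cs)
  let m := pvA_main lead.2 [] [] []
  let segs0 := m.1
  let cur := m.2.1
  let pats := m.2.2
  -- "if i > 0 or current_segment": i = len(path) after the loops
  let segs1 := if cs.length > 0 || cur != [] then segs0 ++ [cur] else segs0
  if cs.getLast? == some '/' then
    if cs == ['/'] then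
      ("/", [""], pats.map String.ofList, "/")
    else
      let trailing :=
        if segs1 != [] && segs1.getLast? == some [] && pats != [] then
          (pats.getLast?).getD ['/']
        else ['/']
      (String.ofList lead.1, segs1.map String.ofList, pats.map String.ofList, String.ofList trailing)
  else
    (String.ofList lead.1, segs1.map String.ofList, pats.map String.ofList, "")

-- ===== PORT B =====

-- one step of B's run-building loop (runs kept in reverse; Python mutates runs[-1])
def pvB_step (acc : List (List Char)) (c : Char) : List (List Char) :=
  match acc with
  | [] => [[c]]
  | r :: rs => if (r.head? == some '/') == (c == '/') then (r ++ [c]) :: rs else [c] :: r :: rs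

-- runs[0::2]
def pvB_evens : List (List Char) → List (List Char)
  | [] => []
  | [a] => [a]
  | a :: _ :: xs => a :: pvB_evens xs

-- runs[1::2]
def pvB_odds : List (List Char) → List (List Char)
  | [] => []
  | [_] => []
  | _ :: b :: xs => b :: pvB_odds xs

def parse_path_components_py_alt (path : String) : String × List String × List String × String :=
  let runs := (path.toList.foldl pvB_step []).reverse
  -- "if runs and runs[0][0] == '/'": pop the first run off as the leading slashes
  let lr :=
    if (runs.headD []).head? == some '/' then (runs.headD [], runs.tail)
    else (([] : List Char), runs)
  let segs := pvB_evens lr.2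
  let pats := pvB_odds lr.2
  if path.toList.getLast? == some '/' then
    (String.ofList lr.1, (segs ++ [[]]).map String.ofList, pats.map String.ofList,
      String.ofList ((pats.getLast?).getD ['/']))
  else
    (String.ofList lr.1, segs.map String.ofList, pats.map String.ofList, "")

-- ===== PRECONDITION & SPEC =====
def Spec_parse_path_components_py (path : String) (out : String × List String × List String × String) : Prop := out = parse_path_components_py_alt path
instance (path : String) (out : String × List String × List String × String) : Decidable (Spec_parse_path_components_py path out) := by unfold Spec_parse_path_components_py; infer_instance

-- ===== CLAIM (what is proved, stated in full; the proofs are below) =====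
def Claim_equal_parse_path_components_py : Prop := ∀ (path : String), Dom_parse_path_components_py path → Spec_parse_path_components_py path (parse_path_components_py path)


-- ===== LEMMAS AND PROOFS =====

-- character class: is this character a slash?
def pvCls (c : Char) : Bool := c == '/'

-- maximal runs of equal slash-class characters
def pvChunks : List Char → List (List Char)
  | [] => []
  | c :: cs =>
    (c :: cs.takeWhile (fun x => pvCls x == pvCls c)) ::
      pvChunks (cs.dropWhile (fun x => pvCls x == pvCls c))
termination_by cs => cs.length
decreasing_by
  exact Nat.lt_succ_of_le (List.length_dropWhile_le _ _)

-- chunk-level version of A's main loop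
def pvMainChunks : List (List Char) → List (List Char) → List Char → List (List Char) →
    (List (List Char) × List Char × List (List Char))
  | [], segs, cur, pats => (segs, cur, pats)
  | t :: ts, segs, cur, pats =>
    if t.head? == some '/' then pvMainChunks ts (segs ++ [cur]) [] (pats ++ [t])
    else pvMainChunks ts segs (cur ++ t) pats

-- runs invariant: nonempty homogeneous chunks with alternating class, first class b
def pvRuns : Bool → List (List Char) → Prop
  | _, [] => True
  | b, t :: ts => t ≠ [] ∧ (∀ x ∈ t, pvCls x = b) ∧ pvRuns (!b) ts

-- expected segments/current_segment of pvMainChunks, by two-chunk recursion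
def pvSegsOf : List Char → List (List Char) → List (List Char)
  | _, [] => []
  | _, [_] => []
  | cur, t :: _ :: ts => (cur ++ t) :: pvSegsOf [] ts

def pvLastCur : List Char → List (List Char) → List Char
  | cur, [] => cur
  | cur, [t] => cur ++ t
  | _, _ :: _ :: ts => pvLastCur [] ts

theorem pvA_slashes_eq : ∀ (cs pat : List Char),
    pvA_slashes cs pat = (pat ++ cs.takeWhile pvCls, cs.dropWhile pvCls) := by
  intro cs
  induction cs with
  | nil => intro pat; simp [pvA_slashes]
  | cons c cs ih =>
    intro pat
    by_cases h : c = '/'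
    · subst h
      simp [pvA_slashes, ih, pvCls]
    · simp [pvA_slashes, h, pvCls]

theorem pv_takeWhile_all (p : Char → Bool) : ∀ (r cs : List Char), (∀ x ∈ r, p x = true) →
    List.takeWhile p (r ++ cs) = r ++ List.takeWhile p cs := by
  intro r
  induction r with
  | nil => simp
  | cons a r ih =>
    intro cs h
    simp only [List.cons_append, List.takeWhile_cons, h a (by simp)]
    simp [ih cs (fun x hx => h x (by simp [hx]))]

theorem pv_dropWhile_all (p : Char → Bool) : ∀ (r cs : List Char), (∀ x ∈ r, p x = true) →
    List.dropWhile p (r ++ cs) = List.dropWhile p cs := by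
  intro r
  induction r with
  | nil => simp
  | cons a r ih =>
    intro cs h
    simp only [List.cons_append, List.dropWhile_cons, h a (by simp)]
    exact ih cs (fun x hx => h x (by simp [hx]))

-- chunks of a homogeneous block followed by a class break
theorem pvChunks_block : ∀ (b : Bool) (r cs : List Char), r ≠ [] → (∀ x ∈ r, pvCls x = b) →
    (∀ x ∈ cs.head?, pvCls x = !b) → pvChunks (r ++ cs) = r :: pvChunks cs := by
  intro b r cs hne hr hcs
  match r, hne with
  | c :: r', _ =>
    have hc : pvCls c = b := hr c (by simp)
    have hp : ∀ x ∈ r', (fun x => pvCls x == pvCls c) x = true := by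
      intro x hx; simp [hc, hr x (by simp [hx])]
    have hcs' : List.takeWhile (fun x => pvCls x == pvCls c) cs = []
        ∧ List.dropWhile (fun x => pvCls x == pvCls c) cs = cs := by
      cases cs with
      | nil => simp
      | cons d cs' =>
        have hd : pvCls d = !b := hcs d (by simp)
        constructor <;> simp [hd, hc]
    simp only [List.cons_append, pvChunks]
    rw [pv_takeWhile_all _ r' cs hp, pv_dropWhile_all _ r' cs hp, hcs'.1, hcs'.2]
    simp

-- B's fold builds exactly the reversed chunks
-- B's fold extends its open run r (homogeneous of class b) chunk-wise
theorem pvB_fold_block : ∀ (cs r : List Char) (rs : List (List Char)) (b : Bool), r ≠ [] →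
    (∀ x ∈ r, pvCls x = b) →
    List.foldl pvB_step (r :: rs) cs = (pvChunks (r ++ cs)).reverse ++ rs := by
  intro cs
  induction cs with
  | nil =>
    intro r rs b hne hr
    have hb := pvChunks_block b r [] hne hr (by simp)
    simp only [List.append_nil] at hb
    simp only [List.append_nil]
    rw [hb]
    simp [pvChunks]
  | cons c cs ih =>
    intro r rs b hne hr
    match r, hne with
    | h :: r', _ =>
      have hh : pvCls h = b := hr h (by simp)
      have hstep : pvB_step ((h :: r') :: rs) c
          = if (b == pvCls c) then ((h :: r') ++ [c]) :: rs else [c] :: (h :: r') :: rs := by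
        have h2 : ((some h == some '/') : Bool) = b := by simpa [pvCls] using hh
        simp only [pvB_step, List.head?_cons, h2, pvCls]
        rfl
      rw [List.foldl_cons, hstep]
      by_cases hc : pvCls c = b
      · rw [if_pos (by simp [hc])]
        rw [ih ((h :: r') ++ [c]) rs b (by simp) (by
          intro x hx
          rcases List.mem_append.mp hx with hx | hx
          · exact hr x (by simpa using hx)
          · simp only [List.mem_singleton] at hx; subst hx; exact hc)]
        have : (h :: r') ++ [c] ++ cs = (h :: r') ++ (c :: cs) := by simp
        rw [this]
      · have hf : (b == pvCls c) = false := by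
          cases b <;> cases hbb : pvCls c <;> simp_all
        rw [if_neg (by simp [hf])]
        rw [ih [c] ((h :: r') :: rs) (pvCls c) (by simp) (by simp)]
        have hcb : pvCls c = !b := by
          cases hb : pvCls c <;> cases b <;> simp_all
        rw [pvChunks_block b (h :: r') (c :: cs) (by simp) hr (by simp [hcb])]
        simp

-- B's fold builds exactly the reversed chunks
theorem pvB_fold_eq (cs : List Char) : (List.foldl pvB_step [] cs).reverse = pvChunks cs := by
  cases cs with
  | nil => simp [pvChunks]
  | cons c cs =>
    have h0 : pvB_step [] c = [[c]] := rfl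
    rw [List.foldl_cons, h0, pvB_fold_block cs [c] [] (pvCls c) (by simp) (by simp)]
    simp

theorem pvChunks_flatten : ∀ (cs : List Char), (pvChunks cs).flatten = cs := by
  intro cs
  induction cs using pvChunks.induct with
  | case1 => simp [pvChunks]
  | case2 c cs ih =>
    rw [pvChunks]
    simp only [List.flatten_cons, ih]
    simp [List.takeWhile_append_dropWhile]

theorem pvChunks_runs : ∀ (cs : List Char) (c : Char) (cs' : List Char), cs = c :: cs' →
    pvRuns (pvCls c) (pvChunks cs) := by
  intro cs
  induction cs using pvChunks.induct with
  | case1 => intro c cs' h; cases h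
  | case2 c cs ih =>
    intro c0 cs0 h
    obtain ⟨h1, h2⟩ : c = c0 ∧ cs = cs0 := by
      injection h with h1 h2; exact ⟨h1, h2⟩
    subst h1; subst h2
    rw [pvChunks]
    refine ⟨by simp, ?_, ?_⟩
    · intro x hx
      rcases List.mem_cons.mp hx with hx | hx
      · subst hx; rfl
      · have := List.mem_takeWhile_imp hx
        simpa [pvCls] using this
    · set d := List.dropWhile (fun x => pvCls x == pvCls c) cs with hd
      cases hdc : d with
      | nil => simp [pvChunks, pvRuns]
      | cons e d' =>
        have he : pvCls e = !pvCls c := by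
          have := List.head?_dropWhile_not (fun x => pvCls x == pvCls c) cs
          rw [← hd, hdc] at this
          simp only [List.head?_cons] at this
          cases hb : pvCls e <;> cases hb2 : pvCls c <;> simp_all
        have h3 := ih e d' hdc
        rw [hdc, he] at h3
        exact h3

theorem pvA_main_eq : ∀ (cs : List Char) (segs : List (List Char)) (cur : List Char)
    (pats : List (List Char)),
    pvA_main cs segs cur pats = pvMainChunks (pvChunks cs) segs cur pats := by
  intro cs segs cur pats
  induction cs, segs, cur, pats using pvA_main.induct with
  | case1 segs cur pats => simp [pvA_main, pvChunks, pvMainChunks]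
  | case2 c cs segs cur pats hc r ih =>
    -- slash branch
    have hc' : c = '/' := by simpa using hc
    subst hc'
    have hsl : pvA_slashes cs ['/'] = ('/' :: cs.takeWhile pvCls, cs.dropWhile pvCls) := by
      rw [pvA_slashes_eq]; rfl
    have hpred : (fun x => pvCls x == pvCls '/') = pvCls := by
      funext x; simp [pvCls]
    have hr2 : r = ('/' :: cs.takeWhile pvCls, cs.dropWhile pvCls) := hsl
    rw [hr2] at ih
    rw [pvA_main, if_pos (by simp)]
    conv_rhs => rw [pvChunks, hpred]
    conv_rhs => rw [pvMainChunks]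
    rw [if_pos (by simp)]
    simp only [hsl]
    exact ih
  | case3 c cs segs cur pats hc ih =>
    -- non-slash branch
    have hcf : pvCls c = false := by simpa [pvCls] using hc
    have hct : ((some c == some '/') : Bool) = false := by simpa [pvCls] using hcf
    rw [pvA_main, if_neg hc, ih]
    cases cs with
    | nil =>
      conv_rhs => rw [pvChunks]
      rw [pvMainChunks, if_neg (by simp [hct])]
      simp [pvChunks, pvMainChunks]
    | cons d cs2 =>
      conv_rhs => rw [pvChunks]
      by_cases hd : pvCls d = true
      · have h1 : List.takeWhile (fun x => pvCls x == pvCls c) (d :: cs2) = [] := by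
          rw [List.takeWhile_cons, if_neg (by simp [hd, hcf])]
        have h2 : List.dropWhile (fun x => pvCls x == pvCls c) (d :: cs2) = d :: cs2 := by
          rw [List.dropWhile_cons, if_neg (by simp [hd, hcf])]
        rw [h1, h2]
        conv_rhs => rw [pvMainChunks]
        rw [if_neg (by simp [hct])]
      · have hd' : pvCls d = false := by cases h : pvCls d <;> simp_all
        have hdt : ((some d == some '/') : Bool) = false := by simpa [pvCls] using hd'
        have hpp : (fun x => pvCls x == pvCls d) = (fun x => pvCls x == pvCls c) := by
          funext x; rw [hd', hcf]
        have h1 : List.takeWhile (fun x => pvCls x == pvCls c) (d :: cs2)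
            = d :: List.takeWhile (fun x => pvCls x == pvCls c) cs2 := by
          rw [List.takeWhile_cons, if_pos (by simp [hd', hcf])]
        have h2 : List.dropWhile (fun x => pvCls x == pvCls c) (d :: cs2)
            = List.dropWhile (fun x => pvCls x == pvCls c) cs2 := by
          rw [List.dropWhile_cons, if_pos (by simp [hd', hcf])]
        rw [h1, h2]
        conv_lhs => rw [pvChunks, hpp]
        conv_lhs => rw [pvMainChunks]
        rw [if_neg (by simp [hdt])]
        conv_rhs => rw [pvMainChunks]
        rw [if_neg (by simp [hct])]
        simp

-- head test of a homogeneous nonempty run evaluates to its class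
theorem pvHead_test : ∀ (t : List Char) (b : Bool), t ≠ [] → (∀ x ∈ t, pvCls x = b) →
    ((t.head? == some '/') : Bool) = b := by
  intro t b hne hr
  match t, hne with
  | x :: t', _ =>
    have := hr x (by simp)
    simpa [pvCls] using this

theorem pvMainChunks_eq : ∀ (R : List (List Char)) (segs : List (List Char)) (cur : List Char)
    (pats : List (List Char)), pvRuns false R →
    pvMainChunks R segs cur pats =
      (segs ++ pvSegsOf cur R, pvLastCur cur R, pats ++ pvB_odds R) := by
  intro R
  induction R using pvB_odds.induct with
  | case1 => intro segs cur pats _; simp [pvMainChunks, pvSegsOf, pvLastCur, pvB_odds]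
  | case2 t =>
    intro segs cur pats hr
    obtain ⟨h1, h2, -⟩ := hr
    rw [pvMainChunks, if_neg (by simp [pvHead_test t false h1 h2])]
    simp [pvMainChunks, pvSegsOf, pvLastCur, pvB_odds]
  | case3 t p ts ih =>
    intro segs cur pats hr
    obtain ⟨h1, h2, hp1, hp2, hts⟩ := hr
    rw [pvMainChunks, if_neg (by simp [pvHead_test t false h1 h2])]
    rw [pvMainChunks, if_pos (by simp [pvHead_test p true hp1 hp2])]
    rw [ih _ _ _ (by simpa using hts)]
    simp [pvSegsOf, pvLastCur, pvB_odds]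

theorem pvSegs_even : ∀ (R : List (List Char)), R.length % 2 = 0 →
    pvSegsOf [] R = pvB_evens R ∧ pvLastCur [] R = [] := by
  intro R
  induction R using pvB_odds.induct with
  | case1 => intro _; simp [pvSegsOf, pvLastCur, pvB_evens]
  | case2 t => intro h; simp at h
  | case3 t p ts ih =>
    intro h
    have hts : ts.length % 2 = 0 := by simp at h; omega
    obtain ⟨ih1, ih2⟩ := ih hts
    simp [pvSegsOf, pvLastCur, pvB_evens, ih1, ih2]

theorem pvSegs_odd : ∀ (R : List (List Char)), R.length % 2 = 1 →
    pvSegsOf [] R ++ [pvLastCur [] R] = pvB_evens R := by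
  intro R
  induction R using pvB_odds.induct with
  | case1 => intro h; simp at h
  | case2 t => intro _; simp [pvSegsOf, pvLastCur, pvB_evens]
  | case3 t p ts ih =>
    intro h
    have hts : ts.length % 2 = 1 := by simp at h; omega
    simp [pvSegsOf, pvLastCur, pvB_evens, ih hts]

theorem pvRuns_last : ∀ (R : List (List Char)) (b : Bool) (t : List Char), pvRuns b R →
    R.getLast? = some t → t ≠ [] ∧ (∀ x ∈ t, pvCls x = (b ^^ decide (R.length % 2 = 0))) := by
  intro R
  induction R with
  | nil => intro b t _ h; cases h
  | cons u R ih =>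
    intro b t hr hl
    obtain ⟨h1, h2, hR⟩ := hr
    cases R with
    | nil =>
      simp only [List.getLast?_singleton, Option.some.injEq] at hl
      subst hl
      refine ⟨h1, ?_⟩
      intro x hx
      simpa using h2 x hx
    | cons v R' =>
      have hl' : (v :: R').getLast? = some t := by
        simpa [List.getLast?_cons_cons] using hl
      obtain ⟨ht, hcl⟩ := ih (!b) t hR hl'
      refine ⟨ht, ?_⟩
      intro x hx
      have hthis := hcl x hx
      have hL : (u :: v :: R').length = (v :: R').length + 1 := by simp
      rw [hthis, hL]
      by_cases hp : (v :: R').length % 2 = 0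
      · have e1 : (R'.length + 1) % 2 = 0 := by simpa using hp
        have e2 : ¬(R'.length + 1 + 1) % 2 = 0 := by omega
        simp [e1, e2]
      · have e1 : ¬(R'.length + 1) % 2 = 0 := by simpa using hp
        have e2 : (R'.length + 1 + 1) % 2 = 0 := by omega
        simp [e1, e2]

theorem pvFlatten_last : ∀ (R : List (List Char)) (t : List Char), R.getLast? = some t → t ≠ [] →
    R.flatten.getLast? = t.getLast? := by
  intro R
  induction R with
  | nil => intro t h _; cases h
  | cons u R ih =>
    intro t hl ht
    cases R with
    | nil =>
      simp only [List.getLast?_singleton, Option.some.injEq] at hl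
      subst hl
      simp
    | cons v R' =>
      have hl' : (v :: R').getLast? = some t := by
        simpa [List.getLast?_cons_cons] using hl
      have := ih t hl' ht
      rw [List.flatten_cons, List.getLast?_append, this]
      cases hc : t.getLast? with
      | none => exact absurd (by simpa using hc) ht
      | some x => simp

-- ===== VERDICT (by name: the statement is the Claim_ definition above) =====
theorem pvPorts_eq : ∀ (path : String), parse_path_components_py path = parse_path_components_py_alt path := by
  intro path
  unfold parse_path_components_py parse_path_components_py_alt
  rw [pvB_fold_eq]
  generalize path.toList = cs
  cases cs with
  | nil => simp [pvA_main, pvChunks, pvB_evens, pvB_odds]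
  | cons c cs1 =>
    have hc' := Bool.eq_false_or_eq_true (pvCls c)
    -- A's leading-slash phase produces (takeWhile, dropWhile)
    have hlead : (if ((c :: cs1).head? == some '/') = true then pvA_slashes (c :: cs1) [] else ([], c :: cs1))
        = (List.takeWhile pvCls (c :: cs1), List.dropWhile pvCls (c :: cs1)) := by
      rcases hc' with hc | hc
      · rw [if_pos (by simpa [pvCls] using hc), pvA_slashes_eq]
        simp
      · rw [if_neg (by simpa [pvCls] using hc)]
        rw [List.takeWhile_cons, if_neg (by simp [hc]), List.dropWhile_cons, if_neg (by simp [hc])]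
    -- B's pop-leading phase produces the same split, chunk-level
    have hB : (if (((pvChunks (c :: cs1)).headD []).head? == some '/') = true
          then ((pvChunks (c :: cs1)).headD [], (pvChunks (c :: cs1)).tail)
          else (([] : List Char), pvChunks (c :: cs1)))
        = (List.takeWhile pvCls (c :: cs1), pvChunks (List.dropWhile pvCls (c :: cs1))) := by
      rcases hc' with hc | hc
      · have hcc : c = '/' := by simpa [pvCls] using hc
        subst hcc
        have hpred : (fun x => pvCls x == pvCls '/') = pvCls := by funext x; simp [pvCls]
        rw [pvChunks, hpred]
        rw [if_pos (by simp)]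
        simp [pvCls]
      · have hh : ((pvChunks (c :: cs1)).headD []).head? = some c := by
          rw [pvChunks]; simp
        have hcne : ¬(c = '/') := by simpa [pvCls] using hc
        rw [if_neg (by rw [hh]; simp [hcne])]
        rw [List.takeWhile_cons, if_neg (by simp [hc]), List.dropWhile_cons, if_neg (by simp [hc])]
    -- the runs of the remainder alternate starting with a non-slash run
    have hruns : pvRuns false (pvChunks (List.dropWhile pvCls (c :: cs1))) := by
      cases hD : List.dropWhile pvCls (c :: cs1) with
      | nil => simp [pvChunks, pvRuns]
      | cons d ds =>
        have hd := List.head?_dropWhile_not pvCls (c :: cs1)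
        rw [hD] at hd
        simp only [List.head?_cons] at hd
        have h2 := pvChunks_runs (d :: ds) d ds rfl
        rwa [hd] at h2
    simp only [hlead, hB]
    rw [pvA_main_eq, pvMainChunks_eq _ _ _ _ hruns]
    -- the last char of the path determines the parity of the runs of the remainder
    have hDlast : ∀ d ds, List.dropWhile pvCls (c :: cs1) = d :: ds →
        ∃ z, (c :: cs1).getLast? = some z ∧
          pvCls z = (false ^^ decide ((pvChunks (d :: ds)).length % 2 = 0)) := by
      intro d ds hD
      have hRne : pvChunks (d :: ds) ≠ [] := by rw [pvChunks]; simp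
      obtain ⟨t, hRl⟩ : ∃ t, (pvChunks (d :: ds)).getLast? = some t := by
        cases hRl : (pvChunks (d :: ds)).getLast? with
        | none => exact absurd (List.getLast?_eq_none_iff.mp hRl) hRne
        | some t => exact ⟨t, rfl⟩
      have hruns' : pvRuns false (pvChunks (d :: ds)) := by rwa [hD] at hruns
      obtain ⟨htne, hcls⟩ := pvRuns_last (pvChunks (d :: ds)) false t hruns' hRl
      obtain ⟨z, hz⟩ : ∃ z, t.getLast? = some z := by
        cases hz : t.getLast? with
        | none => exact absurd (List.getLast?_eq_none_iff.mp hz) htne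
        | some z => exact ⟨z, rfl⟩
      refine ⟨z, ?_, ?_⟩
      · have hfl := pvFlatten_last (pvChunks (d :: ds)) t hRl htne
        rw [pvChunks_flatten] at hfl
        have hds : (d :: ds).getLast? = some z := hfl.trans hz
        have hsplit := List.takeWhile_append_dropWhile (p := pvCls) (l := c :: cs1)
        rw [← hsplit, hD, List.getLast?_append, hds]
        rfl
      · exact hcls z (List.mem_of_getLast? hz)
    by_cases hlast : (c :: cs1).getLast? = some '/'
    · -- path ends with '/'
      have heven : pvSegsOf [] (pvChunks (List.dropWhile pvCls (c :: cs1))) =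
            pvB_evens (pvChunks (List.dropWhile pvCls (c :: cs1))) ∧
          pvLastCur [] (pvChunks (List.dropWhile pvCls (c :: cs1))) = [] := by
        cases hD : List.dropWhile pvCls (c :: cs1) with
        | nil => simp [pvChunks, pvSegsOf, pvLastCur, pvB_evens]
        | cons d ds =>
          obtain ⟨z, hz1, hz2⟩ := hDlast d ds hD
          rw [hlast] at hz1
          have hzslash : z = '/' := by injection hz1 with h; exact h.symm
          subst hzslash
          have hX : decide ((pvChunks (d :: ds)).length % 2 = 0) = true := by
            simpa [pvCls] using hz2.symm
          exact pvSegs_even (pvChunks (d :: ds)) (of_decide_eq_true hX)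
      by_cases hroot : c :: cs1 = ['/']
      · -- root path "/"
        obtain ⟨hc1, hcs1⟩ : c = '/' ∧ cs1 = [] := by
          injection hroot with h1 h2; exact ⟨h1, h2⟩
        subst hc1; subst hcs1
        have hD : List.dropWhile pvCls ['/'] = [] := by simp [pvCls]
        have hT : List.takeWhile pvCls ['/'] = ['/'] := by simp [pvCls]
        rw [hD, hT]
        simp [pvChunks, pvB_odds, pvB_evens]
      · by_cases hP : pvB_odds (pvChunks (List.dropWhile pvCls (c :: cs1))) = []
        · simp [hlast, heven.1, heven.2, hP]
          intro h1 h2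
          exact absurd (by rw [h1, h2]) hroot
        · simp [hlast, heven.1, heven.2, hP]
          intro h1 h2
          exact absurd (by rw [h1, h2]) hroot
    · -- path does not end with '/'
      have hDne : List.dropWhile pvCls (c :: cs1) ≠ [] := by
        intro hD
        have hsplit := List.takeWhile_append_dropWhile (p := pvCls) (l := c :: cs1)
        rw [hD, List.append_nil] at hsplit
        obtain ⟨z, hz⟩ : ∃ z, (List.takeWhile pvCls (c :: cs1)).getLast? = some z := by
          cases hz : (List.takeWhile pvCls (c :: cs1)).getLast? with
          | none =>
            rw [List.getLast?_eq_none_iff.mp hz] at hsplit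
            exact absurd hsplit.symm (List.cons_ne_nil c cs1)
          | some z => exact ⟨z, rfl⟩
        have hzmem := List.mem_of_getLast? hz
        have hzslash : pvCls z = true := List.mem_takeWhile_imp hzmem
        have hzl : (c :: cs1).getLast? = some z := by rw [← hsplit]; exact hz
        rw [hzl] at hlast
        exact hlast (by simpa [pvCls] using hzslash)
      obtain ⟨d, ds, hD⟩ : ∃ d ds, List.dropWhile pvCls (c :: cs1) = d :: ds := by
        cases hD : List.dropWhile pvCls (c :: cs1) with
        | nil => exact absurd hD hDne
        | cons d ds => exact ⟨d, ds, rfl⟩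
      obtain ⟨z, hz1, hz2⟩ := hDlast d ds hD
      have hzne : ¬(z = '/') := fun h => hlast (by rw [hz1, h])
      have hodd : (pvChunks (d :: ds)).length % 2 = 1 := by
        have hzf : pvCls z = false := by simpa [pvCls] using hzne
        rw [hzf] at hz2
        cases h : decide ((pvChunks (d :: ds)).length % 2 = 0) with
        | true => rw [h] at hz2; simp at hz2
        | false => simp at h; omega
      have hodd2 := pvSegs_odd (pvChunks (d :: ds)) hodd
      rw [hD]
      simp [hlast, ← hodd2]

theorem parse_path_components_py_spec : Claim_equal_parse_path_components_py := by
  unfold Claim_equal_parse_path_components_py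
  intro path _
  unfold Spec_parse_path_components_py
  exact pvPorts_eq path
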